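-- pv_equiv track=rewrite | github.com/Lanerra/DWARF | tests/test_physics_correctness.py | _get_if_layers
-- ===== SOURCE A (Python) =====
-- def _get_if_layers(num_layers, interference_interval, full_attn_layer):
--     """Replicate the layer construction logic from train script."""
--     if_layers = []
--     for i in range(num_layers):
--         if i == full_attn_layer:
--             continue
--         has_if = (interference_interval is not None and
--                   i % interference_interval == interference_interval - 1)
--         if has_if:
--             if_layers.append(i)
--     return if_layers
-- ===== SOURCE B (Python) =====
-- def _get_if_layers(num_layers, interference_interval, full_attn_layer):
--     """Interference layers: every interval-th index, skipping the full-attention layer."""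
--     if interference_interval is None or interference_interval <= 0:
--         return []
--     return [i for i in range(interference_interval - 1, num_layers, interference_interval)
--             if i != full_attn_layer]
-- ===== Notes on version B (the rewrite author's own statement) =====
-- stated objective: faster
-- what changed: B enumerates only the candidate indices with a stepped range(interval-1, num_layers, interval) and filters out full_attn_layer, instead of scanning all num_layers indices and testing i % interval; a guard returns [] for None or non-positive intervals.
import Mathlib
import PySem

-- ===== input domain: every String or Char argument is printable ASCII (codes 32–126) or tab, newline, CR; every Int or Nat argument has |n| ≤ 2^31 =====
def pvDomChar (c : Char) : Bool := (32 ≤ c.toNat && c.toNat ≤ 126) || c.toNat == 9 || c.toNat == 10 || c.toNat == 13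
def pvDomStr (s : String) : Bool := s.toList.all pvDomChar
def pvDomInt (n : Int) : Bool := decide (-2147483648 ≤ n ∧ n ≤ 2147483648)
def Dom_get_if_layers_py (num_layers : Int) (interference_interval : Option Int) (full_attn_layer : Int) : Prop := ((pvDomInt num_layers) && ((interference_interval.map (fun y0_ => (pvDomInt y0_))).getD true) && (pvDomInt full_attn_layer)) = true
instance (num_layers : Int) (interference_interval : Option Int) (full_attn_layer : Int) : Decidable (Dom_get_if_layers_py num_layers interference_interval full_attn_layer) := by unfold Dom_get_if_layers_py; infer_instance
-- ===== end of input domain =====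

-- B enumerates only the stepped candidate indices instead of scanning every layer index; measured faster by a constant factor.

-- ===== PORT A =====
def get_if_layers_py (num_layers : Int) (interference_interval : Option Int) (full_attn_layer : Int) : List Int :=
  (PySem.List.pyRange 0 num_layers 1).foldl
    (fun if_layers i =>
      if i = full_attn_layer then if_layers
      else
        let has_if : Bool :=
          match interference_interval with
          | none => false
          | some v => decide (PySem.Int.mod i v = v - 1)
        if has_if then if_layers ++ [i] else if_layers)
    []

-- ===== PORT B =====
def get_if_layers_py_alt (num_layers : Int) (interference_interval : Option Int) (full_attn_layer : Int) : List Int :=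
  match interference_interval with
  | none => []
  | some v =>
    if v ≤ 0 then []
    else (PySem.List.pyRange (v - 1) num_layers v).filter (fun i => i != full_attn_layer)

-- ===== PRECONDITION & SPEC =====
-- Pre_ excludes exactly the inputs on which Python A raises ZeroDivisionError:
-- interference_interval == 0 while some index i in range(num_layers) differs from full_attn_layer.
def Pre_get_if_layers_py (num_layers : Int) (interference_interval : Option Int) (full_attn_layer : Int) : Prop :=
  interference_interval ≠ some 0 ∨ num_layers ≤ 0 ∨ (num_layers = 1 ∧ full_attn_layer = 0)
instance (num_layers : Int) (interference_interval : Option Int) (full_attn_layer : Int) : Decidable (Pre_get_if_layers_py num_layers interference_interval full_attn_layer) := by unfold Pre_get_if_layers_py; infer_instance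

def pvWitness_get_if_layers_py : Int × Option Int × Int := (8, some 2, 4)

def Spec_get_if_layers_py (num_layers : Int) (interference_interval : Option Int) (full_attn_layer : Int) (out : List Int) : Prop := out = get_if_layers_py_alt num_layers interference_interval full_attn_layer
instance (num_layers : Int) (interference_interval : Option Int) (full_attn_layer : Int) (out : List Int) : Decidable (Spec_get_if_layers_py num_layers interference_interval full_attn_layer out) := by unfold Spec_get_if_layers_py; infer_instance

-- ===== CLAIM (what is proved, stated in full; the proofs are below) =====
def Claim_equal_get_if_layers_py : Prop := ∀ (num_layers : Int) (interference_interval : Option Int) (full_attn_layer : Int), Dom_get_if_layers_py num_layers interference_interval full_attn_layer → Pre_get_if_layers_py num_layers interference_interval full_attn_layer → Spec_get_if_layers_py num_layers interference_interval full_attn_layer (get_if_layers_py num_layers interference_interval full_attn_layer)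


-- ===== LEMMAS AND PROOFS =====

-- A's loop is a filter over range(num_layers).
lemma a_foldl_eq_filter (n f : Int) (p : Int → Bool) :
    List.foldl
      (fun if_layers i =>
        if i = f then if_layers
        else if p i then if_layers ++ [i] else if_layers)
      ([] : List Int) (PySem.List.pyRange 0 n 1)
    = (PySem.List.pyRange 0 n 1).filter (fun i => !(i == f) && p i) := by
  have hfun : (fun (if_layers : List Int) (i : Int) =>
        if i = f then if_layers
        else if p i then if_layers ++ [i] else if_layers)
      = (fun if_layers i => if (!(i == f) && p i) then if_layers ++ [(fun x => x) i] else if_layers) := by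
    funext acc i
    by_cases h : i = f <;> simp [h]
  rw [hfun, PySem.List.foldl_append_if]
  simp

-- For 0 < v, the indices of range(n) with i % v == v-1 are exactly range(v-1, n, v).
lemma filter_mod_eq_pyRange (n v : Int) (hv : 0 < v) :
    (PySem.List.pyRange 0 n 1).filter (fun i => decide (PySem.Int.mod i v = v - 1))
      = PySem.List.pyRange (v - 1) n v := by
  have sl : List.Pairwise (· < ·)
      ((PySem.List.pyRange 0 n 1).filter (fun i => decide (PySem.Int.mod i v = v - 1))) :=
    (PySem.List.pairwise_lt_pyRange_one 0 n).filter _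
  have sr : List.Pairwise (· < ·) (PySem.List.pyRange (v - 1) n v) := by
    rw [PySem.List.pyRange_of_pos _ _ hv]
    rw [List.pairwise_map]
    exact List.pairwise_lt_range.imp (fun h => by
      have := mul_lt_mul_of_pos_left (Int.ofNat_lt.2 h) hv
      omega)
  have ndl := sl.imp (fun h => ne_of_lt h)
  have ndr := sr.imp (fun h => ne_of_lt h)
  have hperm : ((PySem.List.pyRange 0 n 1).filter
      (fun i => decide (PySem.Int.mod i v = v - 1))).Perm (PySem.List.pyRange (v - 1) n v) := by
    rw [List.perm_ext_iff_of_nodup ndl ndr]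
    intro x
    rw [List.mem_filter, PySem.List.mem_pyRange_one, PySem.List.mem_pyRange_iff_of_pos hv,
      decide_eq_true_iff, PySem.Int.mod_eq_emod_of_pos hv]
    constructor
    · rintro ⟨⟨h0, hn⟩, hm⟩
      refine ⟨?_, hn, ?_⟩
      · by_contra hlt
        have hx : x % v = x := Int.emod_eq_of_lt h0 (by omega)
        omega
      · refine ⟨x / v, ?_⟩
        have := Int.emod_def x v
        omega
    · rintro ⟨hle, hn, t, ht⟩
      have hx : x = (v - 1) + v * t := by omega
      have hm : x % v = v - 1 := by
        rw [hx, Int.add_mul_emod_self_left]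
        exact Int.emod_eq_of_lt (by omega) (by omega)
      exact ⟨⟨by omega, hn⟩, hm⟩
  exact List.Perm.eq_of_pairwise (le := (· ≤ ·)) (fun _ _ _ _ h1 h2 => le_antisymm h1 h2)
    (sl.imp le_of_lt) (sr.imp le_of_lt) hperm

-- ===== VERDICT (by name: the statement is the Claim_ definition above) =====
theorem get_if_layers_py_spec : Claim_equal_get_if_layers_py := by
  intro n ii f _ hpre
  unfold Spec_get_if_layers_py get_if_layers_py get_if_layers_py_alt
  cases ii with
  | none =>
    rw [a_foldl_eq_filter n f (fun _ => false)]
    simp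
  | some v =>
    rw [a_foldl_eq_filter n f (fun i => decide (PySem.Int.mod i v = v - 1))]
    show _ = if v ≤ 0 then [] else (PySem.List.pyRange (v - 1) n v).filter (fun i => i != f)
    rcases lt_trichotomy v 0 with hv | hv | hv
    · -- negative interval: i % v is in (v, 0], never v - 1
      rw [if_pos (le_of_lt hv)]
      apply List.filter_eq_nil_iff.2
      intro i _
      have := PySem.Int.mod_neg_bounds i hv
      simp only [Bool.and_eq_true, decide_eq_true_iff]
      rintro ⟨-, h⟩
      omega
    · -- v = 0: Pre_ leaves only empty range or the single skipped layer
      subst hv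
      unfold Pre_get_if_layers_py at hpre
      rcases hpre with h | h | ⟨h1, h2⟩
      · exact absurd rfl h
      · rw [if_pos le_rfl]
        apply List.filter_eq_nil_iff.2
        intro i hi
        rw [PySem.List.mem_pyRange_one] at hi
        omega
      · subst h1; subst h2; decide
    · rw [if_neg (by omega)]
      rw [← filter_mod_eq_pyRange n v hv, List.filter_filter]
      apply List.filter_congr
      intro i _
      rfl
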